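-- pv_equiv track=rewrite | github.com/masarina/DaijinAi | ServerSide/BallPassSchedulePattern/Players_QrcodeReaderTypes/Scan_b_TrapezoidCorrectionPlayerDir/TrapezoidCorrectionPlayer.py | find_top_bottom_edges
-- ===== SOURCE A (Python) =====
-- def find_top_bottom_edges(matrix):
--     top_edge = None
--     bottom_edge = None
--
--     # 上端のビット1を探すループ
--     for i, row in enumerate(matrix):
--         if any(bit == 1 for bit in row):
--             top_edge = i
--             break
--
--     # 下端のビット1を探すループ（逆順で検索）
--     for i, row in enumerate(reversed(matrix)):
--         if any(bit == 1 for bit in row):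
--             bottom_edge = len(matrix) - 1 - i
--             break
--
--     # ビット1がない場合、行列全体が0なので両端を設定
--     if top_edge is None or bottom_edge is None:
--         top_edge = 0
--         bottom_edge = len(matrix) - 1
--
--     return top_edge, bottom_edge
-- ===== SOURCE B (Python) =====
-- def find_top_bottom_edges(matrix):
--     rows = [i for i, row in enumerate(matrix) if any(bit == 1 for bit in row)]
--     if rows:
--         return rows[0], rows[-1]
--     return 0, len(matrix) - 1
-- ===== Notes on version B (the rewrite author's own statement) =====
-- stated objective: simpler
-- what changed: Replaces A's two directional early-exit scans (forward, and over reversed(matrix) with index arithmetic) by one single pass that collects all 1-containing row indices and reads the first and last entry.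
import Mathlib
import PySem

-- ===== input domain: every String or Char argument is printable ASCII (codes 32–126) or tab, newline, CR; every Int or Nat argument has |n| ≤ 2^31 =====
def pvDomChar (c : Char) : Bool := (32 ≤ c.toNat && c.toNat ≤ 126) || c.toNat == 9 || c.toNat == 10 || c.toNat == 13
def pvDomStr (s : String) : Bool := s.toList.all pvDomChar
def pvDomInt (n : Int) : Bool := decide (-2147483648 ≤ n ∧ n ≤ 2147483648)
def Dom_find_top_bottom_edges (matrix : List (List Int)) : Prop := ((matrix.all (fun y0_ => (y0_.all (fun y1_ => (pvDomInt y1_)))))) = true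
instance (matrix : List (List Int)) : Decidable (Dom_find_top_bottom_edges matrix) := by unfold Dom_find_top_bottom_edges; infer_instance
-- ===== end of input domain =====

-- B replaces A's two directional early-exit scans by one pass collecting the 1-containing row
-- indices and reading the first and last entry (objective: simpler).

-- ===== PORT A =====
-- 'any(bit == 1 for bit in row)'
def pvAny1 (row : List Int) : Bool := row.any (fun bit => bit == 1)

-- the early-exit 'for i, row in enumerate(...)' scan: first index (counted from i) whose row has a 1;
-- both of A's loops have this shape (the second runs it on matrix.reverse)
def pvFirst1 : List (List Int) → Int → Option Int
  | [], _ => none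
  | r :: rs, i => if pvAny1 r then some i else pvFirst1 rs (i + 1)

def find_top_bottom_edges (matrix : List (List Int)) : Int × Int :=
  let top_edge : Option Int := pvFirst1 matrix 0
  let bottom_edge : Option Int :=
    (pvFirst1 matrix.reverse 0).map (fun i => (matrix.length : Int) - 1 - i)
  match top_edge, bottom_edge with
  | some t, some b => (t, b)
  | _, _ => (0, (matrix.length : Int) - 1)

-- ===== PORT B =====
-- the comprehension '[i for i, row in enumerate(matrix) if any(bit == 1 for bit in row)]'
def pvRows1 : List (List Int) → Int → List Int
  | [], _ => []
  | r :: rs, i => if pvAny1 r then i :: pvRows1 rs (i + 1) else pvRows1 rs (i + 1)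

def find_top_bottom_edges_alt (matrix : List (List Int)) : Int × Int :=
  match pvRows1 matrix 0 with
  | [] => (0, (matrix.length : Int) - 1)
  | r :: rs => (r, (r :: rs).getLast (by simp))

-- ===== PRECONDITION & SPEC =====
def Spec_find_top_bottom_edges (matrix : List (List Int)) (out : Int × Int) : Prop := out = find_top_bottom_edges_alt matrix
instance (matrix : List (List Int)) (out : Int × Int) : Decidable (Spec_find_top_bottom_edges matrix out) := by unfold Spec_find_top_bottom_edges; infer_instance

-- ===== CLAIM (what is proved, stated in full; the proofs are below) =====
def Claim_equal_find_top_bottom_edges : Prop := ∀ (matrix : List (List Int)), Dom_find_top_bottom_edges matrix → Spec_find_top_bottom_edges matrix (find_top_bottom_edges matrix)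

-- ===== LEMMAS AND PROOFS =====

-- A's early-exit scan returns the head of B's index list
theorem pvFirst1_eq_head (xs : List (List Int)) (i : Int) :
    pvFirst1 xs i = (pvRows1 xs i).head? := by
  induction xs generalizing i with
  | nil => rfl
  | cons r rs ih =>
    simp only [pvFirst1, pvRows1]
    split <;> simp [ih]

theorem pvRows1_append (as bs : List (List Int)) (i : Int) :
    pvRows1 (as ++ bs) i = pvRows1 as i ++ pvRows1 bs (i + as.length) := by
  induction as generalizing i with
  | nil => simp [pvRows1]
  | cons a t ih =>
    simp only [List.cons_append, pvRows1]
    split <;> simp [ih] <;> ring_nf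

theorem pvRows1_shift (xs : List (List Int)) (i c : Int) :
    pvRows1 xs (i + c) = (pvRows1 xs i).map (fun k => k + c) := by
  induction xs generalizing i with
  | nil => rfl
  | cons r rs ih =>
    simp only [pvRows1]
    split
    · simp only [List.map_cons]
      congr 1
      have := ih (i + 1)
      rw [show i + c + 1 = i + 1 + c by ring, this]
    · rw [show i + c + 1 = i + 1 + c by ring, ih]

-- the reversed scan's indices are len-1-k for k in B's list, back to front
theorem pvRows1_reverse (xs : List (List Int)) :
    pvRows1 xs.reverse 0 =
      (pvRows1 xs 0).reverse.map (fun k => (xs.length : Int) - 1 - k) := by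
  induction xs with
  | nil => rfl
  | cons r rs ih =>
    have hlen : ((r :: rs).length : Int) = (rs.length : Int) + 1 := by simp
    have hcomp : ((fun k => (rs.length : Int) + 1 - 1 - k) ∘ fun k => k + 1)
        = (fun k => (rs.length : Int) - 1 - k) := by
      funext k; simp only [Function.comp]; ring
    simp only [List.reverse_cons, pvRows1_append, ih]
    simp only [pvRows1, List.length_reverse]
    split
    · rw [show (0 : Int) + (rs.length : Int) = rs.length by ring]
      simp only [List.reverse_cons, List.map_append]
      rw [show (0 : Int) + 1 = 0 + 1 by rfl, pvRows1_shift]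
      simp only [List.map_reverse, List.map_map, hlen, hcomp, List.map_cons, List.map_nil]
      norm_num
    · simp only [List.append_nil]
      rw [show (0 : Int) + 1 = 0 + 1 by rfl, pvRows1_shift]
      simp only [List.map_reverse, List.map_map, hlen, hcomp]

-- ===== VERDICT (by name: the statement is the Claim_ definition above) =====
theorem find_top_bottom_edges_spec : Claim_equal_find_top_bottom_edges := by
  intro matrix _
  unfold Spec_find_top_bottom_edges find_top_bottom_edges find_top_bottom_edges_alt
  rw [pvFirst1_eq_head, pvFirst1_eq_head, pvRows1_reverse]
  cases h : pvRows1 matrix 0 with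
  | nil => simp
  | cons r rs =>
    simp only [List.head?_cons, List.map_reverse]
    rw [List.head?_reverse]
    have : ((r :: rs).map (fun k => (matrix.length : Int) - 1 - k)).getLast? =
        some ((matrix.length : Int) - 1 - (r :: rs).getLast (by simp)) := by
      rw [List.getLast?_eq_some_getLast (by simp), List.getLast_map]
    rw [this]
    simp only [Option.map_some]
    ring_nf
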